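-- pv_equiv track=rewrite | github.com/k4west/Algorithm | 백준/Silver/7546. 소수의 주기/소수의 주기.py | finite_decimal_number
-- ===== SOURCE A (Python) =====
-- def finite_decimal_number(z, b):
--     # b의 약수 구하기
--     prime_factors_of_b = []
--     for p in range(2, b + 1):
--         if b % p == 0:
--             prime_factors_of_b.append(p)
--             while b % p == 0:
--                 b //= p
--
--     # 분모가 b의 약수의 곱으로만 이루어졌는지 확인
--     for p in prime_factors_of_b:
--         while z % p == 0:
--             z //= p
--     return z == 1
-- ===== SOURCE B (Python) =====
-- def finite_decimal_number(z, b):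
--     # gcd-based: repeatedly strip from z its common part with b; no factor enumeration.
--     if b < 2:
--         return z == 1
--     g = _gcd(abs(z), b)
--     while g > 1:
--         while z % g == 0:
--             z //= g
--         g = _gcd(abs(z), b)
--     return z == 1
--
--
-- def _gcd(a, b):
--     while b:
--         a, b = b, a % b
--     return a
-- ===== Notes on version B (the rewrite author's own statement) =====
-- stated objective: faster
-- what changed: Replaces A's trial-division scan over all candidates 2..b (to enumerate b's prime factors) with a gcd loop that repeatedly strips from z its common factor with b, so no factor enumeration happens at all.
import Mathlib
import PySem

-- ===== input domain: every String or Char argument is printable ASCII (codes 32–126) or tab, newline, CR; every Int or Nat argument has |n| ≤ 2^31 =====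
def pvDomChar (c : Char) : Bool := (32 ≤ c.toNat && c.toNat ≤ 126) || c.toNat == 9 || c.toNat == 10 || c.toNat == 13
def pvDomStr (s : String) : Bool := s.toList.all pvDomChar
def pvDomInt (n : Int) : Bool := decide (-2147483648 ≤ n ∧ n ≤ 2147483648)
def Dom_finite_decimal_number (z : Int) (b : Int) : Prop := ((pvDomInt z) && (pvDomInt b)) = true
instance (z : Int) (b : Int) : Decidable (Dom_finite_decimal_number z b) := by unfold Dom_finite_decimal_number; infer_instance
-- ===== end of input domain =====

-- B replaces A's scan of every candidate 2..b for prime factors by a gcd loop (faster); return-value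
-- equivalence proved on Pre_ (z ≠ 0 unless b < 2: at z = 0, b ≥ 2 both Pythons loop forever).

-- ===== PORT A =====
-- inner 'while v % p == 0: v //= p'; the fuel only makes the loop total (Python loops forever at v = 0,
-- which Pre_ excludes; the fuel v.natAbs+1 is never exhausted for v ≠ 0, p ≥ 2)
def stripA (p : Int) : Nat → Int → Int
  | 0, v => v
  | f+1, v => if PySem.Int.mod v p = 0 then stripA p f (PySem.Int.floordiv v p) else v

def finite_decimal_number (z : Int) (b : Int) : Bool :=
  -- for p in range(2, b+1): if b % p == 0: append p; while b % p == 0: b //= p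
  let st := (PySem.List.pyRange 2 (b+1) 1).foldl
    (fun (st : List Int × Int) p =>
      if PySem.Int.mod st.2 p = 0 then (st.1 ++ [p], stripA p (st.2.natAbs+1) st.2)
      else st) ([], b)
  -- for p in prime_factors_of_b: while z % p == 0: z //= p ; return z == 1
  decide (st.1.foldl (fun v p => stripA p (v.natAbs+1) v) z = 1)

-- ===== PORT B =====
-- Python '%' on a nonzero divisor shrinks |·|: termination of the Euclid helper below
theorem pymod_natAbs_lt (a b : Int) (hb : ¬ b = 0) : (PySem.Int.mod a b).natAbs < b.natAbs := by
  rcases lt_or_gt_of_ne (fun h => hb h) with h | h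
  · have := PySem.Int.mod_neg_bounds a h
    omega
  · have h1 := PySem.Int.mod_nonneg a h
    have h2 := PySem.Int.mod_lt a h
    omega

-- def _gcd(a, b): while b: a, b = b, a % b; return a
def gcdB (a b : Int) : Int :=
  if _h : b = 0 then a else gcdB b (PySem.Int.mod a b)
termination_by b.natAbs
decreasing_by exact pymod_natAbs_lt a b _h

-- inner 'while z % g == 0: z //= g' of B (same totality fuel as in port A)
def stripB (g : Int) : Nat → Int → Int
  | 0, v => v
  | f+1, v => if PySem.Int.mod v g = 0 then stripB g f (PySem.Int.floordiv v g) else v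

-- 'g = _gcd(abs(z), b); while g > 1: (strip); g = _gcd(abs(z), b)'
def loopB (b : Int) : Nat → Int → Int
  | 0, z => z
  | f+1, z =>
    let g := gcdB |z| b
    if 1 < g then loopB b f (stripB g (z.natAbs+1) z) else z

def finite_decimal_number_alt (z : Int) (b : Int) : Bool :=
  if b < 2 then decide (z = 1)
  else decide (loopB b (z.natAbs+1) z = 1)

-- ===== PRECONDITION & SPEC =====
-- Pre_ excludes z = 0 with b ≥ 2: there BOTH Pythons loop forever (while z % p == 0: z //= p never ends at z = 0).
def Pre_finite_decimal_number (z : Int) (b : Int) : Prop := z ≠ 0 ∨ b < 2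
instance (z : Int) (b : Int) : Decidable (Pre_finite_decimal_number z b) := by unfold Pre_finite_decimal_number; infer_instance
def pvWitness_finite_decimal_number : Int × Int := (3, 10)

def Spec_finite_decimal_number (z : Int) (b : Int) (out : Bool) : Prop := out = finite_decimal_number_alt z b
instance (z : Int) (b : Int) (out : Bool) : Decidable (Spec_finite_decimal_number z b out) := by unfold Spec_finite_decimal_number; infer_instance

-- ===== CLAIM (what is proved, stated in full; the proofs are below) =====
def Claim_equal_finite_decimal_number : Prop := ∀ (z : Int) (b : Int), Dom_finite_decimal_number z b → Pre_finite_decimal_number z b → Spec_finite_decimal_number z b (finite_decimal_number z b)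

-- ===== LEMMAS AND PROOFS =====

-- both programs decide the same arithmetic property: 0 < z and every prime factor of z divides b
def FiniteFrac (z b : Int) : Prop := 0 < z ∧ ∃ k : ℕ, z ∣ b ^ k

theorem div_natAbs_lt (p v : Int) (hp : 2 ≤ p) (hd : p ∣ v) (hv : v ≠ 0) :
    (PySem.Int.floordiv v p).natAbs < v.natAbs := by
  rw [PySem.Int.floordiv_eq_ediv_of_pos (show (0:Int) < p by omega)]
  have hvp : v / p * p = v := Int.ediv_mul_cancel hd
  have hw0 : v / p ≠ 0 := by
    intro h; rw [h] at hvp; simp at hvp; exact hv hvp.symm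
  have habs : v.natAbs = (v / p).natAbs * p.natAbs := by
    conv_lhs => rw [← hvp]
    exact Int.natAbs_mul _ _
  have h2 : (v / p).natAbs < (v / p).natAbs * p.natAbs :=
    (Nat.lt_mul_iff_one_lt_right (by omega)).mpr (by omega)
  omega

theorem stripA_spec (p : Int) (hp : 2 ≤ p) :
    ∀ (f : ℕ) (v : Int), v ≠ 0 → v.natAbs ≤ f →
      stripA p f v ∣ v ∧ ¬ p ∣ stripA p f v ∧ ∃ k : ℕ, v = stripA p f v * p ^ k := by
  intro f
  induction f with
  | zero => intro v hv hf; omega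
  | succ f ih =>
    intro v hv hf
    by_cases hdv : PySem.Int.mod v p = 0
    · have hd : p ∣ v := (PySem.Int.mod_eq_zero_iff_dvd v p).mp hdv
      simp only [stripA, if_pos hdv]
      set w := PySem.Int.floordiv v p with hw
      have hvp : w * p = v := by
        rw [hw, PySem.Int.floordiv_eq_ediv_of_pos (show (0:Int) < p by omega)]
        exact Int.ediv_mul_cancel hd
      have hw0 : w ≠ 0 := by
        intro h; rw [h] at hvp; simp at hvp; exact hv hvp.symm
      have hlt := div_natAbs_lt p v hp hd hv
      obtain ⟨h1, h2, k, h3⟩ := ih w hw0 (by omega)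
      set r := stripA p f w with hr
      refine ⟨h1.trans ⟨p, hvp.symm⟩, h2, k + 1, ?_⟩
      rw [← hvp, h3]; ring
    · simp only [stripA, if_neg hdv]
      refine ⟨dvd_refl v, ?_, 0, by ring⟩
      intro hcdvd
      exact hdv ((PySem.Int.mod_eq_zero_iff_dvd v p).mpr hcdvd)

theorem stripA_natAbs_lt (p v : Int) (hp : 2 ≤ p) (hd : p ∣ v) (hv : v ≠ 0) :
    (stripA p (v.natAbs + 1) v).natAbs < v.natAbs := by
  have hdv : PySem.Int.mod v p = 0 := (PySem.Int.mod_eq_zero_iff_dvd v p).mpr hd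
  simp only [stripA, if_pos hdv]
  have hvp : PySem.Int.floordiv v p * p = v := by
    rw [PySem.Int.floordiv_eq_ediv_of_pos (show (0:Int) < p by omega)]
    exact Int.ediv_mul_cancel hd
  have hw0 : PySem.Int.floordiv v p ≠ 0 := by
    intro h; rw [h] at hvp; simp at hvp; exact hv hvp.symm
  have hlt := div_natAbs_lt p v hp hd hv
  obtain ⟨h1, -, -⟩ := stripA_spec p hp v.natAbs (PySem.Int.floordiv v p) hw0 (by omega)
  have := Nat.le_of_dvd (by omega) (Int.natAbs_dvd_natAbs.mpr h1)
  omega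

theorem stripB_eq (g : Int) (f : ℕ) (v : Int) : stripB g f v = stripA g f v := by
  induction f generalizing v with
  | zero => rfl
  | succ f ih => simp only [stripA, stripB, ih]

-- ---- port A : the candidate scan collects, in particular, every prime factor of b ----

def AInv (b0 : Int) (p : Int) (st : List Int × Int) : Prop :=
  0 < st.2 ∧ st.2 ∣ b0 ∧ (∀ q ∈ st.1, 2 ≤ q ∧ q ∣ b0) ∧
  (∀ d : Int, 2 ≤ d → d < p → ¬ d ∣ st.2) ∧
  (∀ q : Int, 2 ≤ q → Prime q → q ∣ b0 → q ∈ st.1 ∨ q ∣ st.2)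

theorem prime_of_least_divisor (p c : Int) (hp : 2 ≤ p) (hd : p ∣ c) (_hc : 0 < c)
    (hnd : ∀ d : Int, 2 ≤ d → d < p → ¬ d ∣ c) : Prime p := by
  rw [Int.prime_iff_natAbs_prime]
  rw [Nat.prime_def_lt]
  refine ⟨by omega, ?_⟩
  intro m hm hmd
  by_contra hm1
  have hm0 : m ≠ 0 := by rintro rfl; simp at hmd; omega
  have hm2 : 2 ≤ m := by omega
  have h1 : (m : Int) ∣ p := by
    have : (m : Int) ∣ (p.natAbs : Int) := Int.natCast_dvd_natCast.mpr hmd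
    rwa [Int.natAbs_of_nonneg (by omega)] at this
  exact hnd m (by exact_mod_cast hm2) (by omega) (h1.trans hd)

theorem AStep_inv (b0 p : Int) (st : List Int × Int) (hp : 2 ≤ p) (h : AInv b0 p st) :
    AInv b0 (p + 1)
      ((fun (st : List Int × Int) p =>
        if PySem.Int.mod st.2 p = 0 then (st.1 ++ [p], stripA p (st.2.natAbs+1) st.2)
        else st) st p) := by
  obtain ⟨hc0, hcb, hL, hnd, hcomp⟩ := h
  by_cases hdv : PySem.Int.mod st.2 p = 0
  · have hd : p ∣ st.2 := (PySem.Int.mod_eq_zero_iff_dvd st.2 p).mp hdv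
    have hprime : Prime p := prime_of_least_divisor p st.2 hp hd hc0 hnd
    have hcz : st.2 ≠ 0 := by omega
    obtain ⟨h1, h2, k, h3⟩ := stripA_spec p hp (st.2.natAbs + 1) st.2 hcz (by omega)
    simp only [if_pos hdv]
    have hpk : (0:Int) < p ^ k := pow_pos (by omega) k
    have hc'0 : 0 < stripA p (st.2.natAbs + 1) st.2 := by nlinarith [h3]
    refine ⟨hc'0, h1.trans hcb, ?_, ?_, ?_⟩
    · intro q hq
      rcases List.mem_append.mp hq with hq | hq
      · exact hL q hq
      · simp at hq; subst hq; exact ⟨hp, hd.trans hcb⟩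
    · intro d hd2 hdp hddvd
      rcases lt_or_eq_of_le (by omega : d ≤ p) with h' | h'
      · exact hnd d hd2 h' (hddvd.trans h1)
      · subst h'; exact h2 hddvd
    · intro q hq2 hqp hqb
      rcases hcomp q hq2 hqp hqb with hq | hq
      · exact Or.inl (List.mem_append.mpr (Or.inl hq))
      · rw [h3] at hq
        rcases hqp.dvd_or_dvd hq with hq | hq
        · exact Or.inr hq
        · have hq' : q ∣ p := hqp.dvd_of_dvd_pow hq
          have : q = p := by
            have hqn := Int.prime_iff_natAbs_prime.mp hqp
            have hpn := Int.prime_iff_natAbs_prime.mp hprime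
            have := (Nat.prime_dvd_prime_iff_eq hqn hpn).mp (Int.natAbs_dvd_natAbs.mpr hq')
            omega
          subst this
          exact Or.inl (List.mem_append.mpr (Or.inr (by simp)))
  · simp only [if_neg hdv]
    refine ⟨hc0, hcb, hL, ?_, hcomp⟩
    intro d hd2 hdp hddvd
    rcases lt_or_eq_of_le (by omega : d ≤ p) with h' | h'
    · exact hnd d hd2 h' hddvd
    · subst h'
      exact hdv ((PySem.Int.mod_eq_zero_iff_dvd st.2 d).mpr hddvd)

theorem Afold_inv (b0 : Int) (hb : 2 ≤ b0) (n : ℕ) :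
    AInv b0 (2 + (n : Int))
      (((List.range n).map (fun k : ℕ => (2:Int) + (k : Int))).foldl
        (fun (st : List Int × Int) p =>
          if PySem.Int.mod st.2 p = 0 then (st.1 ++ [p], stripA p (st.2.natAbs+1) st.2)
          else st) ([], b0)) := by
  induction n with
  | zero =>
    simp only [List.range_zero, List.map_nil, List.foldl_nil]
    refine ⟨by omega, dvd_refl _, by simp, ?_, ?_⟩
    · intro d hd2 hdp hdd
      simp only [Nat.cast_zero, add_zero] at hdp
      omega
    · intro q hq2 hqp hqb; exact Or.inr hqb
  | succ n ih =>
    rw [List.range_succ, List.map_append, List.foldl_append]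
    simp only [List.map_cons, List.map_nil, List.foldl_cons, List.foldl_nil]
    have hcast : (2:Int) + ((n:Int)) + 1 = 2 + ((n+1 : ℕ) : Int) := by push_cast; ring
    rw [← hcast]
    exact AStep_inv b0 (2 + (n:Int)) _ (by omega) ih

theorem zfold_spec (b : Int) : ∀ (L : List Int) (z : Int), z ≠ 0 →
    (∀ p ∈ L, 2 ≤ p ∧ p ∣ b) →
    (L.foldl (fun v p => stripA p (v.natAbs+1) v) z) ∣ z ∧
    (∀ p ∈ L, ¬ p ∣ L.foldl (fun v p => stripA p (v.natAbs+1) v) z) ∧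
    ∃ m : Int, ∃ k : ℕ, 0 < m ∧ z = (L.foldl (fun v p => stripA p (v.natAbs+1) v) z) * m ∧ m ∣ b ^ k := by
  intro L
  induction L with
  | nil =>
    intro z hz _
    exact ⟨dvd_refl z, by simp, 1, 0, by omega, by simp, by simp⟩
  | cons p L ih =>
    intro z hz hmem
    obtain ⟨hp2, hpb⟩ := hmem p (by simp)
    obtain ⟨h1, h2, k1, h3⟩ := stripA_spec p hp2 (z.natAbs + 1) z hz (by omega)
    set z1 := stripA p (z.natAbs + 1) z with hz1
    have hz10 : z1 ≠ 0 := by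
      intro h; rw [h] at h3; simp at h3; exact hz h3
    obtain ⟨ih1, ih2, m, k, hm0, hmeq, hmd⟩ := ih z1 hz10 (fun q hq => hmem q (by simp [hq]))
    simp only [List.foldl_cons]
    rw [← hz1]
    set r := L.foldl (fun v p => stripA p (v.natAbs+1) v) z1 with hrdef
    refine ⟨ih1.trans h1, ?_, m * p ^ k1, k + k1, ?_, ?_, ?_⟩
    · intro q hq
      rcases List.mem_cons.mp hq with hq | hq
      · subst hq; intro hc; exact h2 (hc.trans ih1)
      · exact ih2 q hq
    · have : (0:Int) < p ^ k1 := pow_pos (by omega) k1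
      nlinarith
    · rw [h3, hmeq]; ring
    · rw [pow_add]
      exact mul_dvd_mul hmd (pow_dvd_pow_of_dvd hpb k1)

theorem A_iff (z b : Int) (hb : 2 ≤ b) (hz : z ≠ 0) :
    (finite_decimal_number z b = true ↔ FiniteFrac z b) := by
  simp only [finite_decimal_number]
  rw [PySem.List.pyRange_one]
  set ST := (((List.range ((b+1) - 2).toNat).map (fun k : ℕ => (2:Int) + (k : Int))).foldl
    (fun (st : List Int × Int) p =>
      if PySem.Int.mod st.2 p = 0 then (st.1 ++ [p], stripA p (st.2.natAbs+1) st.2)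
      else st) ([], b)) with hST
  have hfin : AInv b (b + 1) ST := by
    have h := Afold_inv b hb ((b+1) - 2).toNat
    have hn : (2:Int) + ((((b+1) - 2).toNat : ℕ) : Int) = b + 1 := by omega
    rw [hn] at h
    exact h
  obtain ⟨hc0, hcb, hL, hnd, hcomp⟩ := hfin
  have hc1 : ST.2 = 1 := by
    by_contra hne
    have hle : ST.2 ≤ b := Int.le_of_dvd (by omega) hcb
    exact hnd ST.2 (by omega) (by omega) (dvd_refl _)
  have hcomp' : ∀ q : Int, 2 ≤ q → Prime q → q ∣ b → q ∈ ST.1 := by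
    intro q hq2 hqp hqb
    rcases hcomp q hq2 hqp hqb with h | h
    · exact h
    · rw [hc1] at h
      have := Int.le_of_dvd one_pos h
      omega
  obtain ⟨hr1, hr2, m, k, hm0, hmeq, hmd⟩ := zfold_spec b ST.1 z hz (fun p hp => hL p hp)
  set r := ST.1.foldl (fun v p => stripA p (v.natAbs+1) v) z with hrdef
  rw [decide_eq_true_iff]
  constructor
  · intro h
    rw [h, one_mul] at hmeq
    exact ⟨hmeq ▸ hm0, k, hmeq ▸ hmd⟩
  · rintro ⟨hz0, K, hzd⟩
    have hr0 : 0 < r := by nlinarith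
    by_contra hne
    have hr2' : 2 ≤ r := by omega
    have hq : Nat.Prime r.natAbs.minFac := Nat.minFac_prime (by omega)
    have hqr : (r.natAbs.minFac : Int) ∣ r := by
      have := Int.natCast_dvd_natCast.mpr (Nat.minFac_dvd r.natAbs)
      rwa [Int.natAbs_of_nonneg (by omega)] at this
    have hqprime : Prime ((r.natAbs.minFac : Int)) := Nat.prime_iff_prime_int.mp hq
    have hqb : (r.natAbs.minFac : Int) ∣ b :=
      hqprime.dvd_of_dvd_pow (show (r.natAbs.minFac : Int) ∣ b ^ K from (hqr.trans hr1).trans hzd)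
    have hq2 : 2 ≤ (r.natAbs.minFac : Int) := by exact_mod_cast hq.two_le
    exact hr2 _ (hcomp' _ hq2 hqprime hqb) hqr

-- ---- port B ----

theorem gcdB_eq_gcd : ∀ (n : ℕ) (a b : Int), 0 ≤ a → 0 ≤ b → b.natAbs ≤ n →
    gcdB a b = (Int.gcd a b : Int) := by
  intro n
  induction n with
  | zero =>
    intro a b ha hb hn
    have : b = 0 := by omega
    subst this
    rw [gcdB]
    simp [Int.gcd, Int.natAbs_of_nonneg ha]
  | succ n ih =>
    intro a b ha hb hn
    rw [gcdB]
    by_cases h : b = 0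
    · subst h; simp [Int.gcd, Int.natAbs_of_nonneg ha]
    · rw [dif_neg h]
      have hb0 : 0 < b := by omega
      have hmod : PySem.Int.mod a b = a % b := PySem.Int.mod_eq_emod_of_pos hb0
      have h1 : 0 ≤ a % b := Int.emod_nonneg a (by omega)
      have h2 : a % b < b := Int.emod_lt_of_pos a hb0
      rw [hmod, ih b (a % b) (by omega) h1 (by omega)]
      congr 1
      conv_lhs => rw [Int.emod_def, sub_eq_add_neg, ← mul_neg]
      rw [Int.gcd_add_mul_left_right b a (-(a/b))]
      exact Int.gcd_comm b a

theorem loopB_spec (b : Int) (hb : 2 ≤ b) : ∀ (f : ℕ) (z : Int), z ≠ 0 → z.natAbs ≤ f →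
    loopB b f z ∣ z ∧ Int.gcd (loopB b f z) b = 1 ∧
    ∃ m : Int, ∃ k : ℕ, 0 < m ∧ z = loopB b f z * m ∧ m ∣ b ^ k := by
  intro f
  induction f with
  | zero => intro z hz hf; omega
  | succ f ih =>
    intro z hz hf
    simp only [loopB]
    set g := gcdB |z| b with hgdef
    have hgeq : g = (Int.gcd z b : Int) := by
      rw [hgdef, gcdB_eq_gcd b.natAbs |z| b (abs_nonneg z) (by omega) (le_refl _)]
      congr 1
      simp [Int.gcd, Int.natAbs_abs]
    by_cases hcase : 1 < g
    · rw [if_pos hcase]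
      have hgdz : g ∣ z := by rw [hgeq]; exact Int.gcd_dvd_left z b
      have hgdb : g ∣ b := by rw [hgeq]; exact Int.gcd_dvd_right z b
      have hg2 : 2 ≤ g := by omega
      rw [stripB_eq]
      obtain ⟨h1, h2, k1, h3⟩ := stripA_spec g hg2 (z.natAbs+1) z hz (by omega)
      set z1 := stripA g (z.natAbs+1) z with hz1def
      have hz10 : z1 ≠ 0 := by intro h; rw [h] at h3; simp at h3; exact hz h3
      have hlt := stripA_natAbs_lt g z hg2 hgdz hz
      obtain ⟨ih1, ihgcd, m, k, hm0, hmeq, hmd⟩ := ih z1 hz10 (by omega)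
      set r := loopB b f z1 with hr
      refine ⟨ih1.trans h1, ihgcd, m * g ^ k1, k + k1, ?_, ?_, ?_⟩
      · have : (0:Int) < g ^ k1 := pow_pos (by omega) k1
        nlinarith
      · rw [h3, hmeq]; ring
      · rw [pow_add]
        exact mul_dvd_mul hmd (pow_dvd_pow_of_dvd hgdb k1)
    · rw [if_neg hcase]
      have hgcdne : Int.gcd z b ≠ 0 := by
        intro h; exact hz (Int.eq_zero_of_gcd_eq_zero_left h)
      have hgpos : 0 < g := by
        rw [hgeq]; exact_mod_cast Nat.pos_of_ne_zero hgcdne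
      have hone : g = 1 := by omega
      refine ⟨dvd_refl z, ?_, 1, 0, one_pos, by ring, by simp⟩
      have : ((Int.gcd z b : Int)) = 1 := hgeq ▸ hone
      exact_mod_cast this

theorem B_iff (z b : Int) (hb : 2 ≤ b) (hz : z ≠ 0) :
    (finite_decimal_number_alt z b = true ↔ FiniteFrac z b) := by
  rw [finite_decimal_number_alt, if_neg (by omega), decide_eq_true_iff]
  obtain ⟨h1, hgcd, m, k, hm0, hmeq, hmd⟩ := loopB_spec b hb (z.natAbs+1) z hz (by omega)
  set r := loopB b (z.natAbs+1) z with hr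
  constructor
  · intro h
    rw [h, one_mul] at hmeq
    exact ⟨hmeq ▸ hm0, k, hmeq ▸ hmd⟩
  · rintro ⟨hz0, K, hzd⟩
    have hr0 : 0 < r := by nlinarith
    have hrd : r ∣ b ^ K := h1.trans hzd
    have hcop : Nat.Coprime r.natAbs b.natAbs := hgcd
    have hdn : r.natAbs ∣ b.natAbs ^ K := by
      have := Int.natAbs_dvd_natAbs.mpr hrd
      rwa [Int.natAbs_pow] at this
    have hone : r.natAbs = 1 := Nat.Coprime.eq_one_of_dvd (hcop.pow_right K) hdn
    omega

-- ---- assembling ----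

theorem A_small (z b : Int) (hb : b < 2) : finite_decimal_number z b = decide (z = 1) := by
  have h1 : ((b + 1) - 2).toNat = 0 := by omega
  simp [finite_decimal_number, PySem.List.pyRange_one, h1]

-- ===== VERDICT (by name: the statement is the Claim_ definition above) =====
theorem finite_decimal_number_spec : Claim_equal_finite_decimal_number := by
  intro z b hdom hpre
  unfold Spec_finite_decimal_number
  by_cases hb : b < 2
  · rw [A_small z b hb, finite_decimal_number_alt, if_pos hb]
  · have hb2 : 2 ≤ b := by omega
    have hz : z ≠ 0 := by
      rcases hpre with h | h
      · exact h
      · omega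
    have h1 := A_iff z b hb2 hz
    have h2 := B_iff z b hb2 hz
    exact Bool.coe_iff_coe.mp (h1.trans h2.symm)
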